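-- pv_equiv track=rewrite | github.com/ZzZTripleZzZ/RAPS_SC26 | src/run_frontier.py | _dragonfly_params_for_nodes
-- ===== SOURCE A (Python) =====
-- import math
--
-- def _dragonfly_params_for_nodes(n: int) -> dict:
--     """Find sensible (d, a, p) such that d*(a+1)*p >= n, keeping values balanced."""
--     # Try p from 1..64, pick the most cubic combo
--     best = None
--     for p in range(1, 65):
--         # d*(a+1) >= ceil(n/p)
--         needed = math.ceil(n / p)
--         # d ~= a, so d*(d+1) >= needed => d ~= sqrt(needed)
--         d = max(2, int(math.sqrt(needed)))
--         while d * (d + 1) * p < n: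
--             d += 1
--         a = d  # keep symmetric
--         total = d * (a + 1) * p
--         if total >= n:
--             waste = total - n
--             if best is None or waste < best[0]:
--                 best = (waste, d, a, p)
--     _, d, a, p = best
--     return {"d": d, "a": a, "p": p}
-- ===== SOURCE B (Python) =====
-- import math
--
-- def _dragonfly_params_for_nodes(n: int) -> dict:
--     """Find sensible (d, a, p) such that d*(a+1)*p >= n, keeping values balanced."""
--     # Skip-scan over p: within a maximal run of consecutive p sharing the same
--     # minimal balanced d, waste d*(d+1)*p - n grows strictly with p, so only the
--     # first p of each run can win; jump directly to the next run start.
--     best = None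
--     p = 1
--     while p <= 64:
--         need = -(-n // p)  # ceil(n / p)
--         if need <= 6:
--             d = 2
--         else:
--             r = math.isqrt(need)
--             d = r if r * (r + 1) >= need else r + 1
--         waste = d * (d + 1) * p - n
--         if best is None or waste < best[0]:
--             best = (waste, d, p)
--         if d == 2:
--             break  # d stays 2 for every larger p, with strictly larger waste
--         p = -(-n // ((d - 1) * d))  # first p where the minimal d drops below d
--     _, d, p = best
--     return {"d": d, "a": d, "p": p}
-- ===== Notes on version B (the rewrite author's own statement) =====
-- stated objective: alternative
-- what changed: A scans every p in 1..64 with an inner while-loop bumping d; B is a skip-scan: it computes the minimal balanced d in closed form via math.isqrt, jumps p directly to the next run start where that d drops (a ceiling division), and breaks once d reaches 2, since within a run of constant d the waste grows strictly with p so only the run start can win.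
-- crash fix: On negative n, A raises ValueError from math.sqrt(needed); B never reaches a square root there and returns {'d': 2, 'a': 2, 'p': 1}. — e.g. on _dragonfly_params_for_nodes(-5): A raises ValueError, B returns [("d", 2), ("a", 2), ("p", 1)]
import Mathlib
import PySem

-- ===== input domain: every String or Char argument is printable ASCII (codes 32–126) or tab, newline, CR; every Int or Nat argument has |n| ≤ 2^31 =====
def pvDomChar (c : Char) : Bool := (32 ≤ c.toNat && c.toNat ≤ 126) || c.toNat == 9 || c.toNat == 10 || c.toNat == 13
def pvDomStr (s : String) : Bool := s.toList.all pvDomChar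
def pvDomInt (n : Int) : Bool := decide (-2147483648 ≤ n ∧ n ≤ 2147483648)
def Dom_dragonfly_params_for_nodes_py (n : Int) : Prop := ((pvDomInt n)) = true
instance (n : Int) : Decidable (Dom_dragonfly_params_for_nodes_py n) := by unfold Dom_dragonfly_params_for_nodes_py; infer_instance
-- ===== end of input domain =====

-- B replaces A's scan of all 64 p values by a skip-scan that visits only the first p of
-- each run of consecutive p sharing the same minimal balanced d (objective: alternative).

-- ===== PORT A =====
-- Python: 'while d * (d + 1) * p < n: d += 1'.  The extra conjuncts 0 < p, 0 ≤ d only make the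
-- recursion total (every call site has p ≥ 1, d ≥ 2, where they change nothing).
def pvWhileD (p n d : Int) : Int :=
  if h : d * (d + 1) * p < n ∧ 0 < p ∧ 0 ≤ d then pvWhileD p n (d + 1) else d
termination_by (n - d * (d + 1) * p).toNat
decreasing_by
  obtain ⟨h1, hp, hd⟩ := h
  have h2 : d * (d + 1) * p < (d + 1) * (d + 1 + 1) * p := by nlinarith
  omega

-- one iteration of A's 'for p in range(1, 65)' loop body
def pvStepA (n : Int) (best : Option (Int × Int × Int × Int)) (p : Int) : Option (Int × Int × Int × Int) :=
  -- math.ceil(n / p): exact as integer ceiling on Dom (|n| ≤ 2^31 < 2^53, so the float quotient cannot cross an integer)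
  let needed := -(PySem.Int.floordiv (-n) p)
  -- int(math.sqrt(needed)): equals the integer sqrt on Dom (|needed| ≤ 2^31, correctly rounded double sqrt cannot cross an integer)
  let d0 := max 2 (Int.sqrt needed)
  let d := pvWhileD p n d0
  let a := d
  let total := d * (a + 1) * p
  if total ≥ n then
    let waste := total - n
    match best with
    | none => some (waste, d, a, p)
    | some b => if waste < b.1 then some (waste, d, a, p) else best
  else best

def dragonfly_params_for_nodes_py (n : Int) : List (String × Int) :=
  match (PySem.List.pyRange 1 65 1).foldl (pvStepA n) none with
  | some (_, d, a, p) => [("d", d), ("a", a), ("p", p)]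
  | none => []  -- Python would raise unpacking None; never reached for nonnegative n

-- ===== PORT B =====
-- Source B's 'while p <= 64' loop: p strictly increases each iteration, so 64 units of fuel
-- suffice; the fuel only makes the recursion structural, it never cuts the loop short.
def pvLoopB (n : Int) : Nat → Option (Int × Int × Int) → Int → Option (Int × Int × Int)
  | 0, best, _ => best
  | fuel+1, best, p =>
    if p ≤ 64 then
      let need := -(PySem.Int.floordiv (-n) p)            -- -(-n // p)
      let d := if need ≤ 6 then 2 else
        (let r := Int.sqrt need;                          -- math.isqrt(need)
         if r * (r + 1) ≥ need then r else r + 1)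
      let waste := d * (d + 1) * p - n
      let best' := match best with
        | none => some (waste, d, p)
        | some b => if waste < b.1 then some (waste, d, p) else best
      if d = 2 then best'                                  -- break
      else pvLoopB n fuel best' (-(PySem.Int.floordiv (-n) ((d - 1) * d)))
    else best

def dragonfly_params_for_nodes_py_alt (n : Int) : List (String × Int) :=
  match pvLoopB n 64 none 1 with
  | some (_, d, p) => [("d", d), ("a", d), ("p", p)]
  | none => []  -- unreachable: the first iteration always sets best

-- ===== PRECONDITION & SPEC =====
-- Pre_ excludes negative n, on which A raises ValueError (math.sqrt of a negative number).
def Pre_dragonfly_params_for_nodes_py (n : Int) : Prop := 0 ≤ n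
instance (n : Int) : Decidable (Pre_dragonfly_params_for_nodes_py n) := by unfold Pre_dragonfly_params_for_nodes_py; infer_instance
def pvWitness_dragonfly_params_for_nodes_py : Int := 1000

-- On negative n A raises ValueError from math.sqrt; B never reaches a sqrt there and returns
-- {'d':2,'a':2,'p':1}; checked by theorem dragonfly_params_for_nodes_py_raises at the bottom.
def Raises_dragonfly_params_for_nodes_py (n : Int) : Prop := n < 0
instance (n : Int) : Decidable (Raises_dragonfly_params_for_nodes_py n) := by unfold Raises_dragonfly_params_for_nodes_py; infer_instance
def pvRaiseWitness_dragonfly_params_for_nodes_py : Int := -5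
def pvRaiseWitnessOut_dragonfly_params_for_nodes_py : List (String × Int) := [("d", 2), ("a", 2), ("p", 1)]

def Spec_dragonfly_params_for_nodes_py (n : Int) (out : List (String × Int)) : Prop := out = dragonfly_params_for_nodes_py_alt n
instance (n : Int) (out : List (String × Int)) : Decidable (Spec_dragonfly_params_for_nodes_py n out) := by unfold Spec_dragonfly_params_for_nodes_py; infer_instance

-- ===== CLAIM (what is proved, stated in full; the proofs are below) =====
def Claim_equal_dragonfly_params_for_nodes_py : Prop := ∀ (n : Int), Dom_dragonfly_params_for_nodes_py n → Pre_dragonfly_params_for_nodes_py n → Spec_dragonfly_params_for_nodes_py n (dragonfly_params_for_nodes_py n)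
def Claim_raises_dragonfly_params_for_nodes_py : Prop := (∀ (n : Int), Dom_dragonfly_params_for_nodes_py n → Raises_dragonfly_params_for_nodes_py n → ¬ Pre_dragonfly_params_for_nodes_py n) ∧ (Dom_dragonfly_params_for_nodes_py (pvRaiseWitness_dragonfly_params_for_nodes_py) ∧ Raises_dragonfly_params_for_nodes_py (pvRaiseWitness_dragonfly_params_for_nodes_py) ∧ dragonfly_params_for_nodes_py_alt (pvRaiseWitness_dragonfly_params_for_nodes_py) = pvRaiseWitnessOut_dragonfly_params_for_nodes_py)

-- ===== LEMMAS AND PROOFS =====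

-- needed = ceil(n / p) and the canonical minimal balanced d, shared by both analyses
def pvNeed (n p : Int) : Int := -(PySem.Int.floordiv (-n) p)
def pvCd (n p : Int) : Int :=
  max 2 (if Int.sqrt (pvNeed n p) * (Int.sqrt (pvNeed n p) + 1) ≥ pvNeed n p
         then Int.sqrt (pvNeed n p) else Int.sqrt (pvNeed n p) + 1)

-- ceiling division: q = -(-n // p) is the least m with n ≤ m * p
theorem pvCeil_bounds (n p : Int) (hp : 0 < p) :
    (pvNeed n p - 1) * p < n ∧ n ≤ pvNeed n p * p := by
  exact (PySem.Int.neg_floordiv_neg_eq_iff_of_pos hp).mp rfl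

theorem pvSqrt_le (m : Int) (hm : 0 ≤ m) : Int.sqrt m * Int.sqrt m ≤ m := by
  have h2 : Int.sqrt m = (Nat.sqrt m.toNat : Int) := by simp [Int.sqrt]
  have h0 : Nat.sqrt m.toNat * Nat.sqrt m.toNat ≤ m.toNat := by
    simpa [pow_two] using Nat.sqrt_le' m.toNat
  have h1 : ((Nat.sqrt m.toNat : Int)) * ((Nat.sqrt m.toNat : Int)) ≤ (m.toNat : Int) := by
    exact_mod_cast h0
  rw [h2]; omega

theorem pvSqrt_lt (m : Int) (hm : 0 ≤ m) : m < (Int.sqrt m + 1) * (Int.sqrt m + 1) := by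
  have h2 : Int.sqrt m = (Nat.sqrt m.toNat : Int) := by simp [Int.sqrt]
  have h0 : m.toNat < (Nat.sqrt m.toNat + 1) * (Nat.sqrt m.toNat + 1) := by
    simpa [pow_two, Nat.succ_eq_add_one] using Nat.lt_succ_sqrt' m.toNat
  have h1 : (m.toNat : Int) < ((Nat.sqrt m.toNat : Int) + 1) * ((Nat.sqrt m.toNat : Int) + 1) := by
    exact_mod_cast h0
  rw [h2]; omega

-- characterisation: pvCd is ≥ 2, covers n, and is minimal such (third conjunct)
theorem pvCd_char (n p : Int) (hn : 0 ≤ n) (hp : 0 < p) :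
    2 ≤ pvCd n p ∧ n ≤ pvCd n p * (pvCd n p + 1) * p ∧
      (2 < pvCd n p → (pvCd n p - 1) * pvCd n p * p < n) := by
  obtain ⟨hq1, hq2⟩ := pvCeil_bounds n p hp
  have hneed0 : 0 ≤ pvNeed n p := by nlinarith
  have hr0 : 0 ≤ Int.sqrt (pvNeed n p) := Int.sqrt_nonneg _
  have hrle := pvSqrt_le (pvNeed n p) hneed0
  have hrlt := pvSqrt_lt (pvNeed n p) hneed0
  set need := pvNeed n p with hneed
  set r := Int.sqrt need with hr
  unfold pvCd
  rw [← hneed, ← hr]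
  set d0 : Int := if r * (r + 1) ≥ need then r else r + 1 with hd0
  have hcov : need ≤ d0 * (d0 + 1) := by
    rw [hd0]; split_ifs with hc
    · exact hc
    · nlinarith
  have hd0r : r ≤ d0 ∧ d0 ≤ r + 1 := by rw [hd0]; split_ifs <;> omega
  set c : Int := max 2 d0 with hc
  have hc2 : 2 ≤ c := le_max_left _ _
  have hcd0 : d0 ≤ c := le_max_right _ _
  refine ⟨hc2, ?_, ?_⟩
  · have h1 : need ≤ c * (c + 1) := by nlinarith [hd0r.1]
    nlinarith
  · intro hgt
    have hd02 : 2 < d0 := by rw [hc] at hgt; omega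
    have hcd : c = d0 := by rw [hc]; omega
    have hmin : (d0 - 1) * d0 < need := by
      by_cases hcc : need ≤ r * (r + 1)
      · have he : d0 = r := by rw [hd0, if_pos hcc]
        rw [he]; rw [he] at hd02
        nlinarith
      · have he : d0 = r + 1 := by rw [hd0, if_neg (by omega)]
        rw [he]
        nlinarith
    rw [hcd]
    nlinarith

-- uniqueness of the characterised value
theorem pvCd_unique (n p e : Int) (hn : 0 ≤ n) (hp : 0 < p)
    (h2 : 2 ≤ e) (hcov : n ≤ e * (e + 1) * p)
    (hmin : 2 < e → (e - 1) * e * p < n) : e = pvCd n p := by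
  obtain ⟨hc2, hccov, hcmin⟩ := pvCd_char n p hn hp
  set c := pvCd n p
  rcases lt_trichotomy e c with h | h | h
  · have hcgt : 2 < c := by omega
    have h0 := hcmin hcgt
    have h1 : e * (e + 1) ≤ (c - 1) * c := by nlinarith
    nlinarith
  · exact h
  · have hegt : 2 < e := by omega
    have h0 := hmin hegt
    have h1 : c * (c + 1) ≤ (e - 1) * e := by nlinarith
    nlinarith

-- the d computed in Source B's loop body equals pvCd
theorem pvCd_eq_loopD (n p : Int) (hn : 0 ≤ n) (hp : 0 < p) :
    (if pvNeed n p ≤ 6 then 2 else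
      (let r := Int.sqrt (pvNeed n p);
       if r * (r + 1) ≥ pvNeed n p then r else r + 1)) = pvCd n p := by
  obtain ⟨hq1, hq2⟩ := pvCeil_bounds n p hp
  set need := pvNeed n p with hneed
  split_ifs with h6
  · -- need ≤ 6: the minimal balanced d is 2
    apply pvCd_unique n p 2 hn hp le_rfl _ (by omega)
    nlinarith
  · -- need ≥ 7: r ≥ 2, so the max 2 in pvCd is inert
    have hneed0 : 0 ≤ need := by omega
    have hr0 : 0 ≤ Int.sqrt need := Int.sqrt_nonneg need
    have hrlt := pvSqrt_lt need hneed0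
    set r := Int.sqrt need with hr
    have hr2 : 2 ≤ r := by nlinarith
    show (if r * (r + 1) ≥ need then r else r + 1) = pvCd n p
    unfold pvCd
    rw [← hneed, ← hr]
    split_ifs with hc <;> omega

-- pvCd stays 2 once it is 2
theorem pvCd_two_mono (n p p' : Int) (hn : 0 ≤ n) (hp : 0 < p) (hpp : p ≤ p')
    (h2 : pvCd n p = 2) : pvCd n p' = 2 := by
  obtain ⟨_, hcov, _⟩ := pvCd_char n p hn hp
  rw [h2] at hcov
  exact (pvCd_unique n p' 2 hn (by omega) le_rfl (by nlinarith) (by omega)).symm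

-- pvCd is constant on a run: up to (but excluding) the jump target
theorem pvCd_run (n p p' : Int) (hn : 0 ≤ n) (hp : 0 < p) (hpp : p ≤ p')
    (_hgt : 2 < pvCd n p) (hlt : (pvCd n p - 1) * pvCd n p * p' < n) :
    pvCd n p' = pvCd n p := by
  obtain ⟨hc2, hcov, _⟩ := pvCd_char n p hn hp
  exact (pvCd_unique n p' (pvCd n p) hn (by omega) hc2 (by nlinarith) (fun _ => hlt)).symm

-- the canonical per-p step (Source B's update, with d written as pvCd)
def pvStepB (n : Int) (best : Option (Int × Int × Int)) (p : Int) : Option (Int × Int × Int) :=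
  let d := pvCd n p
  let waste := d * (d + 1) * p - n
  match best with
  | none => some (waste, d, p)
  | some b => if waste < b.1 then some (waste, d, p) else best

theorem pvStepB_some (n : Int) (b : Option (Int × Int × Int)) (p : Int) :
    ∃ c, pvStepB n b p = some c ∧ c.1 ≤ pvCd n p * (pvCd n p + 1) * p - n := by
  unfold pvStepB
  cases b with
  | none => exact ⟨_, rfl, le_rfl⟩
  | some b =>
    simp only
    split_ifs with hw
    · exact ⟨_, rfl, le_rfl⟩
    · exact ⟨b, rfl, by omega⟩

-- folding over p values whose candidate cannot beat the current best is a no-op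
theorem pvFoldB_noop (n : Int) (bb : Int × Int × Int) :
    ∀ (l : List Int), (∀ p' ∈ l, ¬ (pvCd n p' * (pvCd n p' + 1) * p' - n < bb.1)) →
      l.foldl (pvStepB n) (some bb) = some bb := by
  intro l
  induction l with
  | nil => intro _; rfl
  | cons p l ih =>
    intro h
    simp only [List.foldl_cons]
    have hstep : pvStepB n (some bb) p = some bb := by
      unfold pvStepB
      simp only
      rw [if_neg (h p (by simp))]
    rw [hstep]
    exact ih (fun q hq => h q (by simp [hq]))

-- unfolding Source B's loop body into pvStepB + jump
theorem pvLoopB_succ (n : Int) (fuel : Nat) (b : Option (Int × Int × Int)) (p : Int)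
    (hn : 0 ≤ n) (hp : 0 < p) (hp64 : p ≤ 64) :
    pvLoopB n (fuel + 1) b p =
      (if pvCd n p = 2 then pvStepB n b p
       else pvLoopB n fuel (pvStepB n b p)
              (-(PySem.Int.floordiv (-n) ((pvCd n p - 1) * pvCd n p)))) := by
  have hd := pvCd_eq_loopD n p hn hp
  unfold pvNeed at hd
  show (if p ≤ 64 then _ else b) = _
  rw [if_pos hp64]
  simp only [hd]
  rfl

theorem pvLoopB_out (n : Int) (fuel : Nat) (b : Option (Int × Int × Int)) (p : Int)
    (h : 64 < p) : pvLoopB n fuel b p = b := by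
  cases fuel with
  | zero => rfl
  | succ fuel => show (if p ≤ 64 then _ else b) = b; rw [if_neg (by omega)]

-- main bridge: A's full scan folded with the canonical step equals Source B's skip-scan
theorem pvLoopB_eq (n : Int) (hn : 0 ≤ n) :
    ∀ (fuel : Nat) (p : Int) (b : Option (Int × Int × Int)),
      1 ≤ p → p ≤ 64 → (64 - p).toNat < fuel →
      (PySem.List.pyRange p 65 1).foldl (pvStepB n) b = pvLoopB n fuel b p := by
  intro fuel
  induction fuel with
  | zero => intro p b _ _ hf; omega
  | succ fuel ih =>
    intro p b hp1 hp64 hf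
    rw [PySem.List.pyRange_one_cons (by omega : p < 65), List.foldl_cons]
    rw [pvLoopB_succ n fuel b p hn (by omega) hp64]
    obtain ⟨bb, hbb, hble⟩ := pvStepB_some n b p
    rw [hbb]
    by_cases h2 : pvCd n p = 2
    · rw [if_pos h2]
      rw [h2] at hble
      apply pvFoldB_noop
      intro p' hp'
      obtain ⟨hlo, _⟩ := (PySem.List.mem_pyRange_one).mp hp'
      have hc2 : pvCd n p' = 2 := pvCd_two_mono n p p' hn (by omega) (by omega) h2
      rw [hc2]
      omega
    · rw [if_neg h2]
      obtain ⟨hc2, hcov, hcmin⟩ := pvCd_char n p hn (by omega)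
      have hgt : 2 < pvCd n p := by omega
      set d := pvCd n p with hd
      set q : Int := -(PySem.Int.floordiv (-n) ((d - 1) * d)) with hq
      have hdd : 0 < (d - 1) * d := by nlinarith
      obtain ⟨hqa, hqb⟩ := (PySem.Int.neg_floordiv_neg_eq_iff_of_pos hdd).mp hq.symm
      have hpq : p < q := by nlinarith [hcmin hgt]
      -- every p' strictly between p and q keeps d and has strictly larger waste
      have hrun : ∀ p', p < p' → p' < q →
          ¬ (pvCd n p' * (pvCd n p' + 1) * p' - n < bb.1) := by
        intro p' hlo hhi
        have hlt : (d - 1) * d * p' < n := by nlinarith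
        have hcp' : pvCd n p' = d := pvCd_run n p p' hn (by omega) (by omega) hgt hlt
        rw [hcp']
        have : d * (d + 1) * p < d * (d + 1) * p' := by nlinarith
        omega
      by_cases hq64 : q ≤ 64
      · rw [PySem.List.pyRange_one_append (p + 1) q 65 (by omega) (by omega),
            List.foldl_append]
        rw [pvFoldB_noop n bb _ (fun p' hp' => by
          obtain ⟨hlo, hhi⟩ := (PySem.List.mem_pyRange_one).mp hp'
          exact hrun p' (by omega) hhi)]
        exact ih q (some bb) (by omega) hq64 (by omega)
      · rw [pvFoldB_noop n bb _ (fun p' hp' => by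
          obtain ⟨hlo, hhi⟩ := (PySem.List.mem_pyRange_one).mp hp'
          exact hrun p' (by omega) (by omega))]
        rw [pvLoopB_out n fuel (some bb) q (by omega)]

-- ===== A side: the while loop computes pvCd =====

-- A's while loop computes any D that is ≥ the start, satisfies the exit condition,
-- and below which every value from the start still satisfies the loop condition
theorem pvWhileD_eq (p n : Int) (hp : 0 < p) :
    ∀ (k : Nat) (s D : Int), (D - s).toNat = k → 0 ≤ s → s ≤ D → n ≤ D * (D + 1) * p →
    (∀ e, s ≤ e → e < D → e * (e + 1) * p < n) → pvWhileD p n s = D := by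
  intro k
  induction k with
  | zero =>
    intro s D hk hs hsD hD _
    have hsD' : s = D := by omega
    subst hsD'
    rw [pvWhileD]
    exact dif_neg (fun hc => absurd hc.1 (not_lt.mpr hD))
  | succ k ih =>
    intro s D hk hs hsD hD hlt
    have hsltD : s < D := by omega
    rw [pvWhileD]
    have hcond : s * (s + 1) * p < n := hlt s le_rfl hsltD
    rw [dif_pos ⟨hcond, hp, hs⟩]
    exact ih (s + 1) D (by omega) (by omega) (by omega) hD
      (fun e he1 he2 => hlt e (by omega) he2)

-- core: the while-loop result equals pvCd, for each positive p and n ≥ 0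
theorem pvD_eq (n p : Int) (hn : 0 ≤ n) (hp : 0 < p) :
    pvWhileD p n (max 2 (Int.sqrt (pvNeed n p))) = pvCd n p := by
  obtain ⟨hq1, hq2⟩ := pvCeil_bounds n p hp
  have hneed0 : 0 ≤ pvNeed n p := by nlinarith
  have hr0 : 0 ≤ Int.sqrt (pvNeed n p) := Int.sqrt_nonneg _
  have hrle := pvSqrt_le (pvNeed n p) hneed0
  have hrlt := pvSqrt_lt (pvNeed n p) hneed0
  set needed := pvNeed n p with hneed
  set r := Int.sqrt needed with hr
  have hcd : pvCd n p = max 2 (if r * (r + 1) ≥ needed then r else r + 1) := by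
    unfold pvCd; rw [← hneed, ← hr]
  rw [hcd]
  set d0 : Int := if r * (r + 1) ≥ needed then r else r + 1 with hd0
  have hd0r : r ≤ d0 ∧ d0 ≤ r + 1 ∧ needed ≤ d0 * (d0 + 1) := by
    rw [hd0]; split_ifs with hc
    · exact ⟨le_rfl, by omega, hc⟩
    · exact ⟨by omega, le_rfl, by nlinarith⟩
  set D : Int := max 2 d0 with hD
  have hDd0 : d0 ≤ D := le_max_right _ _
  have hD2 : 2 ≤ D := le_max_left _ _
  apply pvWhileD_eq p n hp (D - max 2 r).toNat _ D rfl
  · omega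
  · have : r ≤ d0 := hd0r.1
    omega
  · have h1 : needed ≤ D * (D + 1) := by nlinarith [hd0r.2.2, hd0r.1]
    nlinarith
  · intro e he1 he2
    obtain ⟨hra, hrb, hrcc⟩ := hd0r
    have he2' : e < d0 := by omega
    have hed : e = r ∧ d0 = r + 1 := by omega
    have hrc : r * (r + 1) < needed := by
      by_contra hc
      replace hc := not_lt.mp hc
      have hd0eq : d0 = r := by rw [hd0, if_pos hc]
      omega
    have h5 : e * (e + 1) ≤ needed - 1 := by rw [hed.1]; omega
    nlinarith

-- conv maps the (waste, d, p) best-tuple to A's (waste, d, a, p) with a = d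
def pvConv (o : Option (Int × Int × Int)) : Option (Int × Int × Int × Int) :=
  o.map (fun t => (t.1, t.2.1, t.2.1, t.2.2))

theorem pvStep_eq (n p : Int) (hn : 0 ≤ n) (hp : 0 < p) (b : Option (Int × Int × Int)) :
    pvStepA n (pvConv b) p = pvConv (pvStepB n b p) := by
  unfold pvStepA pvStepB
  simp only
  rw [show -(PySem.Int.floordiv (-n) p) = pvNeed n p from rfl]
  rw [pvD_eq n p hn hp]
  obtain ⟨hc2, hcov, _⟩ := pvCd_char n p hn hp
  rw [if_pos (by omega : pvCd n p * (pvCd n p + 1) * p ≥ n)]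
  cases b with
  | none => simp [pvConv]
  | some t => by_cases hw : pvCd n p * (pvCd n p + 1) * p - n < t.1 <;> simp [pvConv, hw]

theorem pvFold_eq (n : Int) (hn : 0 ≤ n) :
    ∀ (l : List Int) (b : Option (Int × Int × Int)), (∀ p ∈ l, 0 < p) →
      l.foldl (pvStepA n) (pvConv b) = pvConv (l.foldl (pvStepB n) b) := by
  intro l
  induction l with
  | nil => intro b _; rfl
  | cons p l ih =>
    intro b hpos
    simp only [List.foldl_cons]
    rw [pvStep_eq n p hn (hpos p (by simp)) b]
    exact ih _ (fun q hq => hpos q (by simp [hq]))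

-- ===== VERDICT (by name: the statements are the Claim_ definitions above) =====
theorem dragonfly_params_for_nodes_py_spec : Claim_equal_dragonfly_params_for_nodes_py := by
  intro n _ hn
  unfold Spec_dragonfly_params_for_nodes_py dragonfly_params_for_nodes_py dragonfly_params_for_nodes_py_alt
  have h := pvFold_eq n hn (PySem.List.pyRange 1 65 1) none
    (fun p hp => ((PySem.List.mem_pyRange_one).mp hp).1)
  have hconv : pvConv none = none := rfl
  rw [hconv] at h
  rw [h]
  rw [pvLoopB_eq n hn 64 1 none (by omega) (by omega) (by omega)]
  cases pvLoopB n 64 none 1 with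
  | none => rfl
  | some t => rfl

def dragonfly_params_for_nodes_py_raises : Claim_raises_dragonfly_params_for_nodes_py := by
  unfold Claim_raises_dragonfly_params_for_nodes_py
  refine ⟨?_, by decide⟩
  intro n _ hr hp
  exact absurd hp (by unfold Pre_dragonfly_params_for_nodes_py Raises_dragonfly_params_for_nodes_py at *; omega)
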